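-- pv_equiv track=rewrite | github.com/SaiSarvagna26/equilibrium_index_of_array | equilibrium_index_of_array.py | count_even_numbers
-- ===== SOURCE A (Python) =====
-- def count_even_numbers(A, B):
--     result = []
--
--     for i in B:
--         start_index, end_index = i[0], i[1]
--         count = 0
--
--         for j in range(start_index, end_index + 1):
--             if A[j] % 2 == 0:
--                 count += 1
--
--         result.append(count)
--
--     return result
-- ===== SOURCE B (Python) =====
-- def count_even_numbers(A, B):
--     prefix = [0]
--     for x in A:
--         prefix.append(prefix[-1] + (1 if x % 2 == 0 else 0))
--     return [prefix[q[1] + 1] - prefix[q[0]] if q[0] <= q[1] else 0 for q in B]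
-- ===== Notes on version B (the rewrite author's own statement) =====
-- stated objective: faster
-- what changed: B precomputes a prefix-sum array of even counts once and answers each query with one O(1) subtraction instead of rescanning the range.
-- outside the precondition, e.g. on count_even_numbers([1, 2], [[-1, 0]]): A returns [1], B returns [-1]; on count_even_numbers([2], [[-1, 0]]): A returns [2], B returns [0]
import Mathlib
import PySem

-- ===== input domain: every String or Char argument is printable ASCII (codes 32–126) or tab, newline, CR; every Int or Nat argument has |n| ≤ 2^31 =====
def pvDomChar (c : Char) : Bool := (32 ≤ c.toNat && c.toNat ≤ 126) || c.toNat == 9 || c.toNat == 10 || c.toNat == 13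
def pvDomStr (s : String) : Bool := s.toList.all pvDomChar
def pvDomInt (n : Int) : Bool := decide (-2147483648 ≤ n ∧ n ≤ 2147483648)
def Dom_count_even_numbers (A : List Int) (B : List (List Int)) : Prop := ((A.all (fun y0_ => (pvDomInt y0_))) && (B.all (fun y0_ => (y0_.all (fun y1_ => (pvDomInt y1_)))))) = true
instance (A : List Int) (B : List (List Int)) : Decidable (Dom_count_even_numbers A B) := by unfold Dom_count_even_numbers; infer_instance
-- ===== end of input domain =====

-- B replaces A's per-query rescan by a pre-sum array of even counts, one O(1) subtraction per query.

-- ===== PORT A =====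
def count_even_numbers (A : List Int) (B : List (List Int)) : List Int :=
  B.foldl (fun result i =>
    let start_index := PySem.List.pyGetD i 0 0
    let end_index := PySem.List.pyGetD i 1 0
    let count := (PySem.List.pyRange start_index (end_index + 1) 1).foldl
      (fun count j => if PySem.Int.mod (PySem.List.pyGetD A j 0) 2 = 0 then count + 1 else count) 0
    result ++ [count]) []

-- ===== PORT B =====
def count_even_numbers_alt (A : List Int) (B : List (List Int)) : List Int :=
  let pre := A.foldl (fun p x =>
    p ++ [PySem.List.pyGetD p (-1) 0 + (if PySem.Int.mod x 2 = 0 then 1 else 0)]) [0]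
  B.map (fun q =>
    if PySem.List.pyGetD q 0 0 ≤ PySem.List.pyGetD q 1 0 then
      PySem.List.pyGetD pre (PySem.List.pyGetD q 1 0 + 1) 0 - PySem.List.pyGetD pre (PySem.List.pyGetD q 0 0) 0
    else 0)

-- ===== PRECONDITION & SPEC =====
-- Pre_ excludes queries with fewer than two entries and nonempty query ranges not contained in
-- [0, len(A)): on those A either raises IndexError (index past the end or before -len(A)) or, when
-- the range starts at a negative in-range index, returns an accidental negative-index wraparound
-- count that is no more intended than B's equally accidental wrapped pre difference there.
def Pre_count_even_numbers (A : List Int) (B : List (List Int)) : Prop :=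
  ∀ q ∈ B, 2 ≤ q.length ∧
    (PySem.List.pyGetD q 0 0 ≤ PySem.List.pyGetD q 1 0 →
      0 ≤ PySem.List.pyGetD q 0 0 ∧ PySem.List.pyGetD q 1 0 < (A.length : Int))
instance (A : List Int) (B : List (List Int)) : Decidable (Pre_count_even_numbers A B) := by
  unfold Pre_count_even_numbers; infer_instance
def pvWitness_count_even_numbers : List Int × List (List Int) :=
  ([1, 2, 3, 4], [[0, 3], [2, 1], [1, 2]])
def Spec_count_even_numbers (A : List Int) (B : List (List Int)) (out : List Int) : Prop := out = count_even_numbers_alt A B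
instance (A : List Int) (B : List (List Int)) (out : List Int) : Decidable (Spec_count_even_numbers A B out) := by unfold Spec_count_even_numbers; infer_instance

-- ===== CLAIM (what is proved, stated in full; the proofs are below) =====
def Claim_equal_count_even_numbers : Prop := ∀ (A : List Int) (B : List (List Int)), Dom_count_even_numbers A B → Pre_count_even_numbers A B → Spec_count_even_numbers A B (count_even_numbers A B)

-- ===== LEMMAS AND PROOFS =====

-- number of evens among the first k elements, as an Int
def evCnt (xs : List Int) : Int :=
  (xs.countP (fun x => decide (PySem.Int.mod x 2 = 0)) : Int)

-- the prefix list built by B's fold is exactly [evCnt (A.take k) for k in range(len A + 1)]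
theorem prefix_fold_eq (A : List Int) :
    A.foldl (fun p x =>
      p ++ [PySem.List.pyGetD p (-1) 0 + (if PySem.Int.mod x 2 = 0 then 1 else 0)]) [0]
    = (List.range (A.length + 1)).map (fun k => evCnt (A.take k)) := by
  induction A using List.reverseRecOn with
  | nil => simp [evCnt, List.range_succ]
  | append_singleton A x ih =>
    rw [List.foldl_append, ih]
    simp only [List.foldl_cons, List.foldl_nil, List.length_append, List.length_singleton]
    rw [List.range_succ (n := A.length + 1), List.map_append]
    congr 1
    · apply List.map_congr_left
      intro k hk
      simp only [List.mem_range] at hk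
      rw [List.take_append_of_le_length (by omega)]
    · rw [List.range_succ, List.map_append, List.map_singleton,
          PySem.List.pyGetD_neg_one_append_singleton]
      have ht : (A ++ [x]).take (A.length + 1) = A ++ [x] := List.take_of_length_le (by simp)
      by_cases h : (2 : Int) ∣ x <;>
        simp [evCnt, ht, List.countP_append, h]

theorem map_getD_range_take (A : List Int) (m : Nat) (hm : m ≤ A.length) :
    (PySem.List.pyRange 0 (m : Int) 1).map (fun j => PySem.List.pyGetD A j 0) = A.take m := by
  induction m with
  | zero => simp
  | succ m ih =>
    have h1 : ((m + 1 : Nat) : Int) = (m : Int) + 1 := by push_cast; ring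
    rw [h1, PySem.List.pyRange_one_succ_right (by positivity), List.map_append, ih (by omega),
        List.take_add_one, List.map_singleton, PySem.List.pyGetD_natCast]
    simp [List.getD_eq_getElem?_getD, List.getElem?_eq_getElem (show m < A.length by omega)]

theorem count_range_eq (A : List Int) (s e : Int) (hs : 0 ≤ s) (hse : s ≤ e + 1)
    (he : e < (A.length : Int)) :
    (PySem.List.pyRange s (e + 1) 1).foldl
      (fun count j => if PySem.Int.mod (PySem.List.pyGetD A j 0) 2 = 0 then count + 1 else count) 0
    = evCnt (A.take (e + 1).toNat) - evCnt (A.take s.toNat) := by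
  rw [PySem.List.foldl_ite_add_one]
  have key : ∀ (m : Nat), m ≤ A.length →
      ((PySem.List.pyRange 0 (m : Int) 1).countP
        (fun j => decide (PySem.Int.mod (PySem.List.pyGetD A j 0) 2 = 0)) : Int)
      = evCnt (A.take m) := by
    intro m hm
    rw [evCnt, ← map_getD_range_take A m hm, List.countP_map]
    rfl
  have hsplit := PySem.List.pyRange_one_append 0 s (e + 1) hs hse
  have h1 := key s.toNat (by omega)
  have h2 := key (e + 1).toNat (by omega)
  rw [Int.toNat_of_nonneg hs] at h1
  rw [Int.toNat_of_nonneg (by omega)] at h2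
  rw [hsplit, List.countP_append] at h2
  push_cast at h1 h2 ⊢
  omega

theorem prefix_getD (A : List Int) (k : Int) (h0 : 0 ≤ k) (hk : k ≤ (A.length : Int)) :
    PySem.List.pyGetD
      (A.foldl (fun p x =>
        p ++ [PySem.List.pyGetD p (-1) 0 + (if PySem.Int.mod x 2 = 0 then 1 else 0)]) [0]) k 0
    = evCnt (A.take k.toNat) := by
  rw [prefix_fold_eq]
  obtain ⟨m, rfl⟩ := Int.eq_ofNat_of_zero_le h0
  have hm : m ≤ A.length := by exact_mod_cast hk
  rw [PySem.List.pyGetD_natCast]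
  simp [List.getD_eq_getElem?_getD,
        show m < A.length + 1 by omega]

-- ===== VERDICT (by name: the statement is the Claim_ definition above) =====
theorem count_even_numbers_spec : Claim_equal_count_even_numbers := by
  intro A B _ hpre
  unfold Spec_count_even_numbers
  simp only [count_even_numbers, count_even_numbers_alt]
  rw [PySem.List.foldl_append_singleton_eq_map]
  apply List.map_congr_left
  intro q hq
  obtain ⟨hlen, hrange⟩ := hpre q hq
  by_cases hse : PySem.List.pyGetD q 0 0 ≤ PySem.List.pyGetD q 1 0
  · obtain ⟨h0s, hen⟩ := hrange hse
    rw [if_pos hse, count_range_eq A _ _ h0s (by omega) hen,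
        prefix_getD A (PySem.List.pyGetD q 1 0 + 1) (by omega) (by omega),
        prefix_getD A (PySem.List.pyGetD q 0 0) h0s (by omega)]
  · rw [if_neg hse, PySem.List.pyRange_one_eq_nil (by omega)]
    rfl
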